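-- pv_equiv track=rewrite | github.com/ArvindReddy-Bobbili/Leet-Code-Everyday | Day5_Easy.py | checkifnooperationneeded
-- ===== SOURCE A (Python) =====
-- def checkifnooperationneeded(char_list: list, k: int) -> int:
--     countofB = 0
--     countofW = 0
--     for i in range(len(char_list)):
--         if char_list[i] == 'B':
--             countofB += 1
--             countofW = 0
--             if countofB == k:
--                 return 0  # No operation needed if we find a window of 'B's
--         else:
--             countofW += 1
--             countofB = 0
--     return 1  # Operation needed if we didn't find any window of 'B's
-- ===== SOURCE B (Python) =====
-- def checkifnooperationneeded(char_list: list, k: int) -> int: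
--     # Brute-force pattern matching: precompute the target window ['B']*k and
--     # compare it against the k-prefix of every suffix of the list.
--     if k < 1 or k > len(char_list):
--         return 1
--     target = ['B'] * k
--     suffix = char_list
--     while len(suffix) >= k:
--         if suffix[:k] == target:
--             return 0
--         suffix = suffix[1:]
--     return 1
-- ===== Notes on version B (the rewrite author's own statement) =====
-- stated objective: alternative
-- what changed: B precomputes the k-element target window ['B']*k and does naive pattern matching, comparing it against the k-prefix of each successive suffix of the list, instead of A's single-pass running-counter scan; the guards for k<1 and k>len return 1 directly since no window can exist.
import Mathlib
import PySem

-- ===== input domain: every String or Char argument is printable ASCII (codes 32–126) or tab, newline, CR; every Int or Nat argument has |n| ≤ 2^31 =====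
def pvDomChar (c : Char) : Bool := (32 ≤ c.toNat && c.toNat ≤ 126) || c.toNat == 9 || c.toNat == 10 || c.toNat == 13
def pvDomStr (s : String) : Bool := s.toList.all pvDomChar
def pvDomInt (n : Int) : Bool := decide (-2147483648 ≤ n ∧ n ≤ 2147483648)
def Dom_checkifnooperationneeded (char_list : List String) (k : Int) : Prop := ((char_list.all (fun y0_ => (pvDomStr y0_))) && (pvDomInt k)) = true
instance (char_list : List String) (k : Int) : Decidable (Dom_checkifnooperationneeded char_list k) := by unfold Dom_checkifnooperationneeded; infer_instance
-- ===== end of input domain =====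

-- B replaces A's running-counter scan by naive pattern matching: the precomputed
-- target window ['B']*k is compared against the k-prefix of every suffix; same result.

-- ===== PORT A =====
-- the for-loop over indices, carried state (countofB, countofW), early return 0 on countofB == k
def goA (k : Int) : List String → Int → Int → Int
  | [], _, _ => 1
  | c :: rest, countofB, countofW =>
    if c == "B" then
      if countofB + 1 == k then 0 else goA k rest (countofB + 1) 0
    else
      goA k rest 0 (countofW + 1)

def checkifnooperationneeded (char_list : List String) (k : Int) : Int :=
  goA k char_list 0 0

-- ===== PORT B =====
-- the while loop over successive suffixes; called only with 1 ≤ kn, so the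
-- empty-suffix case is the while-test 'len(suffix) >= k' failing.
-- suffix[:k] is PySem.List.slice suffix none (some kn); suffix[1:] = tail
-- (PySem.List.slice_from_one), taken structurally for termination.
def goB (kn : Nat) (target : List String) : List String → Int
  | [] => 1
  | s :: rest =>
    if kn ≤ (s :: rest).length then
      if PySem.List.slice (s :: rest) none (some (kn : Int)) == target then 0
      else goB kn target rest
    else 1

def checkifnooperationneeded_alt (char_list : List String) (k : Int) : Int :=
  if k < 1 || (char_list.length : Int) < k then 1
  else goB k.toNat (List.replicate k.toNat "B") char_list

-- ===== PRECONDITION & SPEC =====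
def Spec_checkifnooperationneeded (char_list : List String) (k : Int) (out : Int) : Prop := out = checkifnooperationneeded_alt char_list k
instance (char_list : List String) (k : Int) (out : Int) : Decidable (Spec_checkifnooperationneeded char_list k out) := by unfold Spec_checkifnooperationneeded; infer_instance

-- ===== CLAIM (what is proved, stated in full; the proofs are below) =====
def Claim_equal_checkifnooperationneeded : Prop := ∀ (char_list : List String) (k : Int), Dom_checkifnooperationneeded char_list k → Spec_checkifnooperationneeded char_list k (checkifnooperationneeded char_list k)

-- ===== LEMMAS AND PROOFS =====

-- Boolean version of A's scan: "the scan starting with counter cb hits a window of k B's".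
def bEx (k : Int) : List String → Int → Bool
  | [], _ => false
  | x :: xs, cb => if x == "B" then (decide (k ≤ cb + 1)) || bEx k xs (cb + 1) else bEx k xs 0

-- Boolean version of B's loop: "some suffix of xs has k-prefix all 'B'".
def wEx (kn : Nat) : List String → Bool
  | [] => false
  | x :: xs => ((x :: xs).take kn == List.replicate kn "B") || wEx kn xs

theorem goA_of_k_nonpos (k : Int) (hk : k ≤ 0) :
    ∀ (xs : List String) (cb cw : Int), 0 ≤ cb → goA k xs cb cw = 1 := by
  intro xs
  induction xs with
  | nil => intro cb cw _; rfl
  | cons x xs ih =>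
    intro cb cw hcb
    simp only [goA]
    split
    · have : ¬ (cb + 1 == k) := by simp; omega
      simp [this, ih (cb + 1) 0 (by omega)]
    · exact ih 0 (cw + 1) (by omega)

theorem goA_eq_bEx (k : Int) :
    ∀ (xs : List String) (cb cw : Int), 0 ≤ cb → cb < k →
      goA k xs cb cw = if bEx k xs cb then 0 else 1 := by
  intro xs
  induction xs with
  | nil => intro cb cw _ _; rfl
  | cons x xs ih =>
    intro cb cw hcb hlt
    simp only [goA, bEx]
    split
    · by_cases h : cb + 1 = k
      · simp [h]
      · have h1 : ¬ (cb + 1 == k) := by simp [h]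
        have h2 : ¬ (k ≤ cb + 1) := by omega
        simp [h1, h2, ih (cb + 1) 0 (by omega) (by omega)]
    · exact ih 0 (cw + 1) (by omega) (by omega)

theorem wEx_of_short (kn : Nat) :
    ∀ (xs : List String), xs.length < kn → wEx kn xs = false := by
  intro xs
  induction xs with
  | nil => intro _; rfl
  | cons x xs ih =>
    intro h
    have hlen : xs.length + 1 < kn := by simpa using h
    have hne : ((x :: xs).take kn == List.replicate kn "B") = false := by
      by_contra hc
      simp only [Bool.not_eq_false, beq_iff_eq] at hc
      have h1 := congrArg List.length hc
      simp at h1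
      omega
    simp only [wEx, hne, Bool.false_or]
    exact ih (by omega)

theorem goB_eq_wEx (kn : Nat) (_hk : 1 ≤ kn) :
    ∀ (xs : List String), goB kn (List.replicate kn "B") xs = if wEx kn xs then 0 else 1 := by
  intro xs
  induction xs with
  | nil => rfl
  | cons x xs ih =>
    simp only [goB, wEx]
    rw [PySem.List.slice_to_natCast]
    by_cases hlen : kn ≤ (x :: xs).length
    · rw [if_pos hlen]
      by_cases ht : ((x :: xs).take kn == List.replicate kn "B") = true
      · simp [ht]
      · simp only [Bool.not_eq_true] at ht
        simp [ht, ih]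
    · rw [if_neg hlen]
      have h1 : wEx kn (x :: xs) = false := wEx_of_short kn _ (by omega)
      simp only [wEx] at h1
      simp [h1]

-- prefix of all-'B's absorbs into the window test
theorem wEx_of_prefix (kn : Nat) (hk : 1 ≤ kn) (xs : List String)
    (h : List.replicate kn "B" <+: xs) : wEx kn xs = true := by
  cases xs with
  | nil =>
    have := h.length_le
    simp at this
    omega
  | cons x xs =>
    have := List.prefix_iff_eq_take.mp h
    simp only [wEx]
    rw [List.length_replicate] at this
    rw [← this]
    simp

theorem replicate_prefix_of_le {m m' : Nat} (h : m' ≤ m) {xs : List String}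
    (hp : List.replicate m "B" <+: xs) : List.replicate m' "B" <+: xs := by
  refine List.IsPrefix.trans ?_ hp
  exact ⟨List.replicate (m - m') "B", by rw [← List.replicate_add]; congr 1; omega⟩

-- the key bridge: A's scan with counter cb succeeds iff the first (k-cb) elements
-- are all 'B', or some window of k 'B's occurs.
theorem bEx_iff_window (k : Int) (hk : 1 ≤ k) :
    ∀ (xs : List String) (cb : Int), 0 ≤ cb → cb < k →
      (bEx k xs cb = true ↔
        (List.replicate (k - cb).toNat "B" <+: xs ∨ wEx k.toNat xs = true)) := by
  intro xs
  induction xs with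
  | nil =>
    intro cb hcb hlt
    simp only [bEx, wEx]
    constructor
    · intro h; simp at h
    · rintro (h | h)
      · have := h.length_le
        simp at this
        omega
      · simp at h
  | cons x xs ih =>
    intro cb hcb hlt
    by_cases hx : (x == "B") = true
    · have hxB : x = "B" := by simpa using hx
      subst hxB
      simp only [bEx, BEq.rfl, if_true]
      have hrep : List.replicate (k - cb).toNat "B" = "B" :: List.replicate ((k - cb).toNat - 1) "B" := by
        have : (k - cb).toNat = ((k - cb).toNat - 1) + 1 := by omega
        rw [this, List.replicate_succ]
        simp
      by_cases h1 : k ≤ cb + 1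
      · have hcb1 : cb + 1 = k := by omega
        have : (k - cb).toNat = 1 := by omega
        constructor
        · intro _
          left
          rw [hrep, this]
          simp [List.cons_prefix_cons]
        · intro _; simp [h1]
      · have hlt1 : cb + 1 < k := by omega
        have hih := ih (cb + 1) (by omega) hlt1
        have harith : (k - (cb + 1)).toNat = (k - cb).toNat - 1 := by omega
        constructor
        · intro h
          simp only [decide_eq_true_eq, Bool.or_eq_true] at h
          rcases h with h | h
          · omega
          · rcases hih.mp h with h2 | h2
            · left
              rw [hrep, ← harith]
              exact List.cons_prefix_cons.mpr ⟨rfl, h2⟩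
            · right
              simp only [wEx]
              simp [h2]
        · rintro (h | h)
          · rw [hrep] at h
            have h2 := (List.cons_prefix_cons.mp h).2
            rw [← harith] at h2
            have : bEx k xs (cb + 1) = true := hih.mpr (Or.inl h2)
            simp [this]
          · simp only [wEx, Bool.or_eq_true] at h
            rcases h with h | h
            · -- the window starts right here: replicate k "B" <+: "B"::xs
              have hp : List.replicate k.toNat "B" <+: ("B" :: xs) := by
                have : ("B" :: xs).take k.toNat = List.replicate k.toNat "B" := by simpa using h
                exact List.prefix_iff_eq_take.mpr (by rw [List.length_replicate, this])
              have hrep2 : List.replicate k.toNat "B" = "B" :: List.replicate (k.toNat - 1) "B" := by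
                have : k.toNat = (k.toNat - 1) + 1 := by omega
                rw [this, List.replicate_succ]
                simp
              rw [hrep2] at hp
              have h2 := (List.cons_prefix_cons.mp hp).2
              have h3 : List.replicate (k - (cb + 1)).toNat "B" <+: xs :=
                replicate_prefix_of_le (by omega) h2
              have : bEx k xs (cb + 1) = true := hih.mpr (Or.inl h3)
              simp [this]
            · have : bEx k xs (cb + 1) = true := hih.mpr (Or.inr h)
              simp [this]
    · have hx' : (x == "B") = false := by simpa using hx
      simp only [bEx, hx', Bool.false_eq_true, if_false]
      have hih := ih 0 le_rfl (by omega)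
      have hnp : ¬ (List.replicate (k - cb).toNat "B" <+: (x :: xs)) := by
        intro h
        have hrep : List.replicate (k - cb).toNat "B" = "B" :: List.replicate ((k - cb).toNat - 1) "B" := by
          have : (k - cb).toNat = ((k - cb).toNat - 1) + 1 := by omega
          rw [this, List.replicate_succ]
          simp
        rw [hrep] at h
        have := (List.cons_prefix_cons.mp h).1
        simp [this] at hx'
      have htk : ((x :: xs).take k.toNat == List.replicate k.toNat "B") = false := by
        by_contra hc
        simp only [Bool.not_eq_false, beq_iff_eq] at hc
        have hktn : k.toNat = (k.toNat - 1) + 1 := by omega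
        rw [hktn, List.take_succ_cons, List.replicate_succ] at hc
        have := List.head_eq_of_cons_eq hc
        simp [this] at hx'
      constructor
      · intro h
        rcases hih.mp h with h2 | h2
        · right
          simp only [wEx, Bool.or_eq_true]
          right
          rw [Int.sub_zero] at h2
          exact wEx_of_prefix k.toNat (by omega) xs h2
        · right
          simp only [wEx, Bool.or_eq_true]
          exact Or.inr h2
      · rintro (h | h)
        · exact absurd h hnp
        · simp only [wEx, Bool.or_eq_true, htk, Bool.false_eq_true, false_or] at h
          exact hih.mpr (Or.inr h)

theorem bEx_eq_wEx (k : Int) (hk : 1 ≤ k) (xs : List String) :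
    bEx k xs 0 = wEx k.toNat xs := by
  by_cases h : bEx k xs 0 = true
  · rw [h]
    rcases (bEx_iff_window k hk xs 0 le_rfl (by omega)).mp h with h2 | h2
    · rw [Int.sub_zero] at h2
      exact (wEx_of_prefix k.toNat (by omega) xs h2).symm
    · exact h2.symm
  · simp only [Bool.not_eq_true] at h
    rw [h]
    by_contra hc
    have hw : wEx k.toNat xs = true := by
      cases hwx : wEx k.toNat xs
      · simp [hwx] at hc
      · rfl
    have := (bEx_iff_window k hk xs 0 le_rfl (by omega)).mpr (Or.inr hw)
    rw [h] at this
    exact Bool.false_ne_true this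

-- ===== VERDICT (by name: the statement is the Claim_ definition above) =====
theorem checkifnooperationneeded_spec : Claim_equal_checkifnooperationneeded := by
  intro char_list k _
  unfold Spec_checkifnooperationneeded checkifnooperationneeded checkifnooperationneeded_alt
  by_cases hk : k < 1
  · rw [if_pos (by simp [hk])]
    exact goA_of_k_nonpos k (by omega) char_list 0 0 le_rfl
  · by_cases hl : (char_list.length : Int) < k
    · rw [if_pos (by simp [hl]),
        goA_eq_bEx k char_list 0 0 le_rfl (by omega),
        bEx_eq_wEx k (by omega) char_list,
        wEx_of_short k.toNat char_list (by omega)]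
      simp
    · rw [if_neg (by simp; omega),
        goA_eq_bEx k char_list 0 0 le_rfl (by omega),
        goB_eq_wEx k.toNat (by omega) char_list,
        bEx_eq_wEx k (by omega) char_list]
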